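-- pv_equiv track=rewrite | github.com/katarzynaadamczyk/AoC | Day_21/task2.py | makeamove
-- ===== SOURCE A (Python) =====
-- from itertools import product
--
-- def makeamove(result, whoplays):
--     # result - dictionary with key as tuple
--     # (positionplayer1, resultplayer1, positionplayer2, resultplayer2): numberofuniverses
--     # whoplays if True player 1, player 2 otherwise
--     newresult = dict()
--     for dice in product([1, 2, 3], repeat=3):
--         for key in result:
--
--             actualposition = (key[0] if whoplays else key[2]) + sum(dice)
--
--             while actualposition > 10:
--                 actualposition -= 10
--
--             actualresult = (key[1] if whoplays else key[3]) + actualposition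
--
--             if whoplays:
--                 newkey = (actualposition, actualresult, key[2], key[3])
--             else:
--                 newkey = (key[0], key[1], actualposition, actualresult)
--
--             newresult.setdefault(newkey, 0)
--             newresult[newkey] += result[key]
--
--
--     return newresult
-- ===== SOURCE B (Python) =====
-- def makeamove(result, whoplays):
--     # One weighted pass per dice-sum (7 sums with their multiplicities) instead of 27 triple passes.
--     WEIGHTS = ((3, 1), (4, 3), (5, 6), (6, 7), (7, 6), (8, 3), (9, 1))
--     newresult = {}
--     for s, c in WEIGHTS:
--         for key, n in result.items():
--             actualposition = (key[0] if whoplays else key[2]) + s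
--             if actualposition > 10:
--                 actualposition = (actualposition - 1) % 10 + 1
--             actualresult = (key[1] if whoplays else key[3]) + actualposition
--             if whoplays:
--                 newkey = (actualposition, actualresult, key[2], key[3])
--             else:
--                 newkey = (key[0], key[1], actualposition, actualresult)
--             newresult[newkey] = newresult.get(newkey, 0) + n * c
--     return newresult
-- ===== Notes on version B (the rewrite author's own statement) =====
-- stated objective: faster
-- what changed: B precomputes the dice-sum multiplicity table {3:1,4:3,5:6,6:7,7:6,8:3,9:1} and does 7 weighted dict-update passes (adding count*weight) instead of A's 27 unit passes over all dice triples, and replaces A's subtract-10 while loop by a single modulo step.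
import Mathlib
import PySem

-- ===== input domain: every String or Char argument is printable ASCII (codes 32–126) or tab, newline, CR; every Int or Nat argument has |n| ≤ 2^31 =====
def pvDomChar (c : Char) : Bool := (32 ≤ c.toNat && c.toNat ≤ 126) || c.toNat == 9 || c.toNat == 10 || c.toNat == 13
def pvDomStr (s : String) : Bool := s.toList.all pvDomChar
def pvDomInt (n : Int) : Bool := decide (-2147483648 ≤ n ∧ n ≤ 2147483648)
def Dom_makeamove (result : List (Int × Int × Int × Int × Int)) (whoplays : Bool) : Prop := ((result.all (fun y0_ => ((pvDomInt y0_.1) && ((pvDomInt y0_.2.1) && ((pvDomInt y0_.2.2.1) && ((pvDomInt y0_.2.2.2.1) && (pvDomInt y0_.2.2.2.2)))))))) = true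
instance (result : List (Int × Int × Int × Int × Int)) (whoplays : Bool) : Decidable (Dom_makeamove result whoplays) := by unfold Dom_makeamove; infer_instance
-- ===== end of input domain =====

-- B replaces A's 27 dice-triple passes by 7 weighted passes over the precomputed dice-sum
-- multiplicity table and A's while-loop wraparound by one modulo step (objective: faster, constant factor).
-- The dict is represented as an association list of flattened 5-tuples (key 4-tuple, value);
-- the dict update 'setdefault(k,0); d[k] += v' is ported by hand as pvUpd (exact: first match
-- bumped in place, missing key appended at the end — Python insertion-order semantics).

-- ===== PORT A =====

-- 'while actualposition > 10: actualposition -= 10'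
def pvRed (p : Int) : Int :=
  if p > 10 then pvRed (p - 10) else p
  termination_by (p - 10).toNat
  decreasing_by omega

-- exact assoc-list model of 'newresult.setdefault(newkey, 0); newresult[newkey] += v'
def pvUpd : List (Int × Int × Int × Int × Int) → (Int × Int × Int × Int) → Int → List (Int × Int × Int × Int × Int)
  | [], (a, b, c, d), v => [(a, b, c, d, v)]
  | (a', b', c', d', v') :: t, (a, b, c, d), v =>
    if (a', b', c', d') = (a, b, c, d) then (a', b', c', d', v' + v) :: t
    else (a', b', c', d', v') :: pvUpd t (a, b, c, d) v

-- product([1, 2, 3], repeat=3), in Python's order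
def pvDice : List (Int × Int × Int) :=
  ([1, 2, 3] : List Int).flatMap (fun x =>
    ([1, 2, 3] : List Int).flatMap (fun y =>
      ([1, 2, 3] : List Int).map (fun z => (x, y, z))))

def makeamove (result : List (Int × Int × Int × Int × Int)) (whoplays : Bool) : List (Int × Int × Int × Int × Int) :=
  pvDice.foldl (fun nr dice =>
    result.foldl (fun nr e =>
      match e, dice with
      | (p1, r1, p2, r2, n), (d1, d2, d3) =>
        let ap := pvRed ((if whoplays then p1 else p2) + (d1 + d2 + d3))
        let ar := (if whoplays then r1 else r2) + ap
        let nk := if whoplays then (ap, ar, p2, r2) else (p1, r1, ap, ar)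
        pvUpd nr nk n) nr) []

-- ===== PORT B =====

-- the precomputed dice-sum multiplicity table {3:1,4:3,5:6,6:7,7:6,8:3,9:1}
def pvWeights : List (Int × Int) := [(3, 1), (4, 3), (5, 6), (6, 7), (7, 6), (8, 3), (9, 1)]

def makeamove_alt (result : List (Int × Int × Int × Int × Int)) (whoplays : Bool) : List (Int × Int × Int × Int × Int) :=
  pvWeights.foldl (fun nr sc =>
    result.foldl (fun nr e =>
      match e, sc with
      | (p1, r1, p2, r2, n), (s, c) =>
        let ap0 := (if whoplays then p1 else p2) + s
        let ap := if ap0 > 10 then PySem.Int.mod (ap0 - 1) 10 + 1 else ap0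
        let ar := (if whoplays then r1 else r2) + ap
        let nk := if whoplays then (ap, ar, p2, r2) else (p1, r1, ap, ar)
        pvUpd nr nk (n * c)) nr) []

-- ===== PRECONDITION & SPEC =====
def Spec_makeamove (result : List (Int × Int × Int × Int × Int)) (whoplays : Bool) (out : List (Int × Int × Int × Int × Int)) : Prop := out = makeamove_alt result whoplays
instance (result : List (Int × Int × Int × Int × Int)) (whoplays : Bool) (out : List (Int × Int × Int × Int × Int)) : Decidable (Spec_makeamove result whoplays out) := by unfold Spec_makeamove; infer_instance

-- ===== CLAIM (what is proved, stated in full; the proofs are below) =====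
def Claim_equal_makeamove : Prop := ∀ (result : List (Int × Int × Int × Int × Int)) (whoplays : Bool), Dom_makeamove result whoplays → Spec_makeamove result whoplays (makeamove result whoplays)

-- ===== LEMMAS AND PROOFS =====

-- the new key an entry produces for a given dice sum (A's form, with the while loop)
def nkA (w : Bool) (s : Int) (e : Int × Int × Int × Int × Int) : Int × Int × Int × Int :=
  match e with
  | (p1, r1, p2, r2, _) =>
    let ap := pvRed ((if w then p1 else p2) + s)
    let ar := (if w then r1 else r2) + ap
    if w then (ap, ar, p2, r2) else (p1, r1, ap, ar)

def val5 (e : Int × Int × Int × Int × Int) : Int := e.2.2.2.2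

-- pairs view of the dict
def flat5 (e : (Int × Int × Int × Int) × Int) : Int × Int × Int × Int × Int :=
  (e.1.1, e.1.2.1, e.1.2.2.1, e.1.2.2.2, e.2)

def updP : List ((Int × Int × Int × Int) × Int) → (Int × Int × Int × Int) → Int → List ((Int × Int × Int × Int) × Int)
  | [], k, v => [(k, v)]
  | (k', v') :: t, k, v => if k' = k then (k', v' + v) :: t else (k', v') :: updP t k v

def accP (d : List ((Int × Int × Int × Int) × Int)) (l : List ((Int × Int × Int × Int) × Int)) : List ((Int × Int × Int × Int) × Int) :=
  l.foldl (fun d kv => updP d kv.1 kv.2) d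

def tot : List ((Int × Int × Int × Int) × Int) → (Int × Int × Int × Int) → Int
  | [], _ => 0
  | (k', v) :: l, k => (if k' = k then v else 0) + tot l k

-- first-occurrence dedup with an explicit 'seen' list
def ddF {α : Type} [DecidableEq α] : List α → List α → List α
  | [], _ => []
  | a :: l, seen => if a ∈ seen then ddF l seen else a :: ddF l (a :: seen)

def sums27 : List Int := [3,4,5,4,5,6,5,6,7,4,5,6,5,6,7,6,7,8,5,6,7,6,7,8,7,8,9]

def streamA (result : List (Int × Int × Int × Int × Int)) (w : Bool) : List ((Int × Int × Int × Int) × Int) :=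
  sums27.flatMap (fun s => result.map (fun e => (nkA w s e, val5 e)))

def streamB (result : List (Int × Int × Int × Int × Int)) (w : Bool) : List ((Int × Int × Int × Int) × Int) :=
  pvWeights.flatMap (fun sc => result.map (fun e => (nkA w sc.1 e, val5 e * sc.2)))


theorem pvRed_eq_mod (p : Int) : pvRed p = if p > 10 then PySem.Int.mod (p - 1) 10 + 1 else p := by
  fun_induction pvRed p with
  | case1 p h ih =>
    rw [ih]
    simp only [h, if_pos]
    split_ifs with h2
    · have : PySem.Int.mod (p - 10 - 1) 10 = PySem.Int.mod (p - 1) 10 := by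
        rw [PySem.Int.mod_eq_emod_of_pos (by norm_num), PySem.Int.mod_eq_emod_of_pos (by norm_num)]
        omega
      omega
    · rw [PySem.Int.mod_eq_emod_of_pos (by norm_num)]
      omega
  | case2 p h => simp [h]

theorem pvUpd_flat (l : List ((Int × Int × Int × Int) × Int)) (k : Int × Int × Int × Int) (v : Int) :
    pvUpd (l.map flat5) k v = (updP l k v).map flat5 := by
  obtain ⟨a, b, c, d⟩ := k
  induction l with
  | nil => simp [pvUpd, updP, flat5]
  | cons e t ih =>
    obtain ⟨⟨a', b', c', d'⟩, v'⟩ := e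
    simp only [List.map_cons, flat5, pvUpd, updP]
    split_ifs <;> simp_all [flat5, Prod.ext_iff]

theorem passP_eq (result : List (Int × Int × Int × Int × Int))
    (f : (Int × Int × Int × Int × Int) → (Int × Int × Int × Int))
    (g : (Int × Int × Int × Int × Int) → Int)
    (d : List ((Int × Int × Int × Int) × Int)) :
    result.foldl (fun nr e => pvUpd nr (f e) (g e)) (d.map flat5)
    = (accP d (result.map (fun e => (f e, g e)))).map flat5 := by
  induction result generalizing d with
  | nil => simp [accP]
  | cons e t ih =>
    simp only [List.foldl_cons, List.map_cons, accP]
    rw [pvUpd_flat]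
    exact ih (updP d _ _)

theorem accP_append (d : List ((Int × Int × Int × Int) × Int)) (x y : List ((Int × Int × Int × Int) × Int)) :
    accP d (x ++ y) = accP (accP d x) y := by
  simp [accP, List.foldl_append]

theorem makeamove_eq (result : List (Int × Int × Int × Int × Int)) (w : Bool) :
    makeamove result w = (accP [] (streamA result w)).map flat5 := by
  have hbody : ∀ dice : Int × Int × Int, (fun (nr : List (Int × Int × Int × Int × Int)) e =>
      match e, dice with
      | (p1, r1, p2, r2, n), (d1, d2, d3) =>
        let ap := pvRed ((if w then p1 else p2) + (d1 + d2 + d3))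
        let ar := (if w then r1 else r2) + ap
        let nk := if w then (ap, ar, p2, r2) else (p1, r1, ap, ar)
        pvUpd nr nk n)
      = (fun nr e => pvUpd nr (nkA w (dice.1 + dice.2.1 + dice.2.2) e) (val5 e)) := by
    rintro ⟨d1, d2, d3⟩
    funext nr e
    obtain ⟨p1, r1, p2, r2, n⟩ := e
    simp [nkA, val5]
  have gen : ∀ (ds : List (Int × Int × Int)) (d : List ((Int × Int × Int × Int) × Int)),
      ds.foldl (fun nr dice =>
        result.foldl (fun nr e =>
          match e, dice with
          | (p1, r1, p2, r2, n), (d1, d2, d3) =>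
            let ap := pvRed ((if w then p1 else p2) + (d1 + d2 + d3))
            let ar := (if w then r1 else r2) + ap
            let nk := if w then (ap, ar, p2, r2) else (p1, r1, ap, ar)
            pvUpd nr nk n) nr) (d.map flat5)
      = (accP d (ds.flatMap (fun dice =>
          result.map (fun e => (nkA w (dice.1 + dice.2.1 + dice.2.2) e, val5 e))))).map flat5 := by
    intro ds
    induction ds with
    | nil => simp [accP]
    | cons dice dt ih =>
      intro d
      simp only [List.foldl_cons, List.flatMap_cons, accP_append]
      rw [hbody dice, passP_eq]
      exact ih _
  have h := gen pvDice []
  simp only [List.map_nil] at h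
  unfold makeamove
  rw [h]
  have hs : pvDice.flatMap (fun dice => result.map (fun e => (nkA w (dice.1 + dice.2.1 + dice.2.2) e, val5 e)))
      = streamA result w := by
    have h27 : sums27 = pvDice.map (fun dice => dice.1 + dice.2.1 + dice.2.2) := by decide
    rw [streamA, h27, List.flatMap_map]
  rw [hs]

theorem makeamove_alt_eq (result : List (Int × Int × Int × Int × Int)) (w : Bool) :
    makeamove_alt result w = (accP [] (streamB result w)).map flat5 := by
  have hbody : ∀ sc : Int × Int, (fun (nr : List (Int × Int × Int × Int × Int)) e =>
      match e, sc with
      | (p1, r1, p2, r2, n), (s, c) =>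
        let ap0 := (if w then p1 else p2) + s
        let ap := if ap0 > 10 then PySem.Int.mod (ap0 - 1) 10 + 1 else ap0
        let ar := (if w then r1 else r2) + ap
        let nk := if w then (ap, ar, p2, r2) else (p1, r1, ap, ar)
        pvUpd nr nk (n * c))
      = (fun nr e => pvUpd nr (nkA w sc.1 e) (val5 e * sc.2)) := by
    rintro ⟨s, c⟩
    funext nr e
    obtain ⟨p1, r1, p2, r2, n⟩ := e
    simp [nkA, val5, pvRed_eq_mod]
  have gen : ∀ (ws : List (Int × Int)) (d : List ((Int × Int × Int × Int) × Int)),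
      ws.foldl (fun nr sc =>
        result.foldl (fun nr e =>
          match e, sc with
          | (p1, r1, p2, r2, n), (s, c) =>
            let ap0 := (if w then p1 else p2) + s
            let ap := if ap0 > 10 then PySem.Int.mod (ap0 - 1) 10 + 1 else ap0
            let ar := (if w then r1 else r2) + ap
            let nk := if w then (ap, ar, p2, r2) else (p1, r1, ap, ar)
            pvUpd nr nk (n * c)) nr) (d.map flat5)
      = (accP d (ws.flatMap (fun sc =>
          result.map (fun e => (nkA w sc.1 e, val5 e * sc.2))))).map flat5 := by
    intro ws
    induction ws with
    | nil => simp [accP]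
    | cons sc st ih =>
      intro d
      simp only [List.foldl_cons, List.flatMap_cons, accP_append]
      rw [hbody sc, passP_eq]
      exact ih _
  have h := gen pvWeights []
  simp only [List.map_nil] at h
  unfold makeamove_alt
  rw [h]
  rfl

theorem mem_ddF {α : Type} [DecidableEq α] {a : α} : ∀ {l seen : List α}, a ∈ ddF l seen → a ∉ seen := by
  intro l
  induction l with
  | nil => intro seen h; simp [ddF] at h
  | cons b t ih =>
    intro seen h
    simp only [ddF] at h
    split_ifs at h with hb
    · exact ih h
    · rcases List.mem_cons.mp h with rfl | h2
      · exact hb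
      · intro hs
        exact ih h2 (List.mem_cons_of_mem _ hs)

theorem ddF_congr {α : Type} [DecidableEq α] : ∀ (l s₁ s₂ : List α), (∀ x, x ∈ s₁ ↔ x ∈ s₂) → ddF l s₁ = ddF l s₂ := by
  intro l
  induction l with
  | nil => intro _ _ _; rfl
  | cons a t ih =>
    intro s₁ s₂ h
    simp only [ddF]
    by_cases ha : a ∈ s₁
    · rw [if_pos ha, if_pos ((h a).mp ha)]
      exact ih _ _ h
    · rw [if_neg ha, if_neg (fun c => ha ((h a).mpr c))]
      congr 1
      exact ih _ _ (by intro x; simp [h x])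

theorem ddF_append {α : Type} [DecidableEq α] : ∀ (x y s : List α), ddF (x ++ y) s = ddF x s ++ ddF y (x ++ s) := by
  intro x
  induction x with
  | nil => intro y s; rfl
  | cons a t ih =>
    intro y s
    simp only [List.cons_append, ddF]
    by_cases ha : a ∈ s
    · rw [if_pos ha, if_pos ha, ih]
      congr 1
      exact ddF_congr _ _ _ (by intro x; simp; rintro rfl; right; exact ha)
    · rw [if_neg ha, if_neg ha, ih]
      simp only [List.cons_append]
      congr 2
      exact ddF_congr _ _ _ (by intro x; simp; tauto)

theorem ddF_nil {α : Type} [DecidableEq α] : ∀ (l s : List α), (∀ x ∈ l, x ∈ s) → ddF l s = [] := by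
  intro l
  induction l with
  | nil => intro _ _; rfl
  | cons a t ih =>
    intro s h
    simp only [ddF, if_pos (h a (List.mem_cons_self))]
    exact ih s (fun x hx => h x (List.mem_cons_of_mem _ hx))

theorem ddF_flatMap {α β : Type} [DecidableEq α] [DecidableEq β] (f : α → List β) :
    ∀ (sl : List α) (seen : List β) (sseen : List α),
    (∀ s ∈ sseen, ∀ x ∈ f s, x ∈ seen) →
    ddF (sl.flatMap f) seen = ddF ((ddF sl sseen).flatMap f) seen := by
  intro sl
  induction sl with
  | nil => intro _ _ _; rfl
  | cons s t ih =>
    intro seen sseen h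
    simp only [List.flatMap_cons, ddF_append, ddF]
    by_cases hs : s ∈ sseen
    · rw [if_pos hs]
      have hsub : ∀ x ∈ f s, x ∈ seen := h s hs
      rw [ddF_nil _ _ hsub, List.nil_append]
      rw [ddF_congr _ _ seen (by intro x; simp; tauto)]
      exact ih seen sseen h
    · rw [if_neg hs]
      simp only [List.flatMap_cons, ddF_append]
      congr 1
      exact ih (f s ++ seen) (s :: sseen) (by
        intro s' hs' x hx
        rcases List.mem_cons.mp hs' with rfl | hs2
        · exact List.mem_append_left _ hx
        · exact List.mem_append_right _ (h s' hs2 x hx))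

theorem updP_mem : ∀ (d : List ((Int × Int × Int × Int) × Int)) (k : Int × Int × Int × Int) (v : Int),
    (d.map Prod.fst).Nodup → k ∈ d.map Prod.fst →
    updP d k v = d.map (fun kv => if kv.1 = k then (kv.1, kv.2 + v) else kv) := by
  intro d
  induction d with
  | nil => intro k v _ h; simp at h
  | cons e t ih =>
    intro k v hnd hk
    obtain ⟨k', v'⟩ := e
    simp only [List.map_cons, List.nodup_cons] at hnd
    simp only [updP, List.map_cons]
    by_cases h : k' = k
    · subst h
      rw [if_pos rfl]
      simp only [if_pos rfl]
      congr 1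
      have : ∀ kv ∈ t, (if (kv : (Int × Int × Int × Int) × Int).1 = k' then (kv.1, kv.2 + v) else kv) = kv := by
        intro kv hkv
        rw [if_neg]
        intro hc
        exact hnd.1 (hc ▸ List.mem_map_of_mem hkv)
      exact ((List.map_congr_left this).trans (List.map_id _)).symm
    · rw [if_neg h, if_neg h]
      congr 1
      apply ih k v hnd.2
      simp only [List.map_cons, List.mem_cons] at hk
      rcases hk with h1 | h1
      · exact absurd h1.symm h
      · exact h1

theorem updP_not_mem : ∀ (d : List ((Int × Int × Int × Int) × Int)) (k : Int × Int × Int × Int) (v : Int),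
    k ∉ d.map Prod.fst → updP d k v = d ++ [(k, v)] := by
  intro d
  induction d with
  | nil => intro k v _; rfl
  | cons e t ih =>
    intro k v hk
    obtain ⟨k', v'⟩ := e
    simp only [List.map_cons, List.mem_cons, not_or] at hk
    simp only [updP, List.cons_append]
    rw [if_neg (fun c => hk.1 c.symm)]
    congr 1
    exact ih k v hk.2

theorem tot_append : ∀ (x y : List ((Int × Int × Int × Int) × Int)) (k : Int × Int × Int × Int),
    tot (x ++ y) k = tot x k + tot y k := by
  intro x
  induction x with
  | nil => intro y k; simp [tot]
  | cons e t ih =>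
    intro y k
    obtain ⟨k', v⟩ := e
    simp only [List.cons_append, tot, ih, add_assoc]

theorem accP_char : ∀ (l d : List ((Int × Int × Int × Int) × Int)),
    (d.map Prod.fst).Nodup →
    accP d l = d.map (fun kv => (kv.1, kv.2 + tot l kv.1))
      ++ (ddF (l.map Prod.fst) (d.map Prod.fst)).map (fun k => (k, tot l k)) := by
  intro l
  induction l with
  | nil =>
    intro d _
    simp [accP, ddF, tot]
  | cons e l' ih =>
    intro d hnd
    obtain ⟨k, v⟩ := e
    show accP (updP d k v) l' = _
    by_cases hk : k ∈ d.map Prod.fst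
    · rw [updP_mem d k v hnd hk]
      have hkeys : ((d.map (fun kv => if kv.1 = k then (kv.1, kv.2 + v) else kv)).map Prod.fst) = d.map Prod.fst := by
        rw [List.map_map]
        apply List.map_congr_left
        intro kv _
        by_cases h : kv.1 = k <;> simp [h]
      rw [ih _ (by rw [hkeys]; exact hnd), hkeys]
      simp only [List.map_cons, ddF, if_pos hk]
      congr 1
      · rw [List.map_map]
        apply List.map_congr_left
        intro kv _
        obtain ⟨q, u⟩ := kv
        simp only [Function.comp_apply]
        by_cases h : q = k
        · subst h
          simp [tot, add_assoc]
        · simp only [if_neg h, tot]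
          rw [if_neg (fun c => h c.symm), zero_add]
      · apply List.map_congr_left
        intro q hq
        have hq2 : q ∉ d.map Prod.fst := mem_ddF hq
        have : q ≠ k := fun c => hq2 (c ▸ hk)
        simp [tot, if_neg (fun c : k = q => this c.symm)]
    · rw [updP_not_mem d k v hk]
      have hkeys : ((d ++ [(k, v)]).map Prod.fst) = d.map Prod.fst ++ [k] := by simp
      have hnd' : (((d ++ [(k, v)]).map Prod.fst)).Nodup := by
        rw [hkeys]
        refine List.Nodup.append hnd (List.nodup_singleton _) ?_
        intro x hx hx2
        simp only [List.mem_singleton] at hx2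
        subst hx2
        exact hk hx
      rw [ih _ hnd', hkeys]
      simp only [List.map_cons, ddF, if_neg hk, List.map_append]
      rw [List.append_assoc]
      congr 1
      · apply List.map_congr_left
        intro kv hkv
        obtain ⟨q, u⟩ := kv
        have hq : q ≠ k := fun c => hk (c ▸ List.mem_map_of_mem hkv)
        simp only [tot]
        rw [if_neg (fun c => hq c.symm), zero_add]
      · rw [ddF_congr (l'.map Prod.fst) (d.map Prod.fst ++ [k]) (k :: d.map Prod.fst) (by intro x; simp; tauto)]
        simp only [List.map_cons, List.map_nil, List.singleton_append, List.cons_append, List.nil_append]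
        congr 1
        · simp [tot]
        · apply List.map_congr_left
          intro q hq
          have hq2 := mem_ddF hq
          have : q ≠ k := fun c => hq2 (c ▸ List.mem_cons_self)
          simp [tot, if_neg (fun c : k = q => this c.symm)]

theorem tot_flatMap {α : Type} (f : α → List ((Int × Int × Int × Int) × Int)) :
    ∀ (sl : List α) (k : Int × Int × Int × Int),
    tot (sl.flatMap f) k = (sl.map (fun s => tot (f s) k)).sum := by
  intro sl
  induction sl with
  | nil => intro k; simp [tot]
  | cons s t ih => intro k; simp [List.flatMap_cons, tot_append, ih]

theorem tot_map_mul (result : List (Int × Int × Int × Int × Int))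
    (g : (Int × Int × Int × Int × Int) → (Int × Int × Int × Int)) (c : Int)
    (k : Int × Int × Int × Int) :
    tot (result.map (fun e => (g e, val5 e * c))) k
      = (tot (result.map (fun e => (g e, val5 e))) k) * c := by
  induction result with
  | nil => simp [tot]
  | cons e t ih =>
    simp only [List.map_cons, tot, ih]
    split_ifs <;> ring

theorem tot_streams (result : List (Int × Int × Int × Int × Int)) (w : Bool)
    (k : Int × Int × Int × Int) :
    tot (streamA result w) k = tot (streamB result w) k := by
  unfold streamA streamB
  rw [tot_flatMap, tot_flatMap]
  simp only [sums27, pvWeights, List.map_cons, List.map_nil, List.sum_cons, List.sum_nil,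
    tot_map_mul]
  ring

theorem dd_keys_eq (result : List (Int × Int × Int × Int × Int)) (w : Bool) :
    ddF ((streamA result w).map Prod.fst) [] = ddF ((streamB result w).map Prod.fst) [] := by
  have hA : (streamA result w).map Prod.fst
      = sums27.flatMap (fun s => result.map (fun e => nkA w s e)) := by
    simp [streamA, List.map_flatMap, List.map_map, Function.comp_def]
  have hB : (streamB result w).map Prod.fst
      = ([3, 4, 5, 6, 7, 8, 9] : List Int).flatMap (fun s => result.map (fun e => nkA w s e)) := by
    simp only [streamB, List.map_flatMap, List.map_map]
    have : (fun (a : Int × Int) => result.map (Prod.fst ∘ fun e => (nkA w a.1 e, val5 e * a.2)))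
        = (fun (a : Int × Int) => result.map (fun e => nkA w a.1 e)) := by
      funext a
      simp [Function.comp_def]
    rw [this]
    have h2 : pvWeights.flatMap (fun sc => result.map (fun e => nkA w sc.1 e))
        = (pvWeights.map Prod.fst).flatMap (fun s => result.map (fun e => nkA w s e)) := by
      rw [List.flatMap_map]
    rw [h2]
    rfl
  rw [hA, hB]
  rw [ddF_flatMap (fun s => result.map (fun e => nkA w s e)) sums27 [] [] (by simp)]
  have : ddF sums27 ([] : List Int) = [3, 4, 5, 6, 7, 8, 9] := by decide
  rw [this]

theorem accP_streams_eq (result : List (Int × Int × Int × Int × Int)) (w : Bool) :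
    accP [] (streamA result w) = accP [] (streamB result w) := by
  rw [accP_char (streamA result w) [] (by simp), accP_char (streamB result w) [] (by simp)]
  simp only [List.map_nil, List.nil_append]
  rw [dd_keys_eq]
  apply List.map_congr_left
  intro k _
  rw [tot_streams]

-- ===== VERDICT (by name: the statement is the Claim_ definition above) =====
theorem makeamove_spec : Claim_equal_makeamove := by
  intro result whoplays _
  unfold Spec_makeamove
  rw [makeamove_eq, makeamove_alt_eq, accP_streams_eq]
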